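-- pv_equiv track=rewrite | github.com/Fercomp/Algorithms | Learning/Matrix/TheBlocksProblem.py | get_stacked_blocks
-- ===== SOURCE A (Python) =====
-- def get_stacked_blocks(a, i, blocks):
--     result = []
--     while blocks[i][-1] != a:
--         aux = blocks[i].pop()
--         result.append(aux)
--     aux = blocks[i].pop()
--     result.append(aux)
--     return result
-- ===== SOURCE B (Python) =====
-- def get_stacked_blocks(a, i, blocks):
--     lst = blocks[i]
--     rev = lst[::-1]
--     j = rev.index(a)              # rightmost occurrence of a in lst
--     del lst[len(lst) - 1 - j:]    # same in-place mutation as A's pops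
--     return rev[:j + 1]
-- ===== Notes on version B (the rewrite author's own statement) =====
-- stated objective: alternative
-- what changed: Replaces the one-at-a-time pop loop with a single scan: locate the rightmost occurrence of a via reversed-list index, return that reversed suffix as one slice and truncate the stack with one del.
import Mathlib
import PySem

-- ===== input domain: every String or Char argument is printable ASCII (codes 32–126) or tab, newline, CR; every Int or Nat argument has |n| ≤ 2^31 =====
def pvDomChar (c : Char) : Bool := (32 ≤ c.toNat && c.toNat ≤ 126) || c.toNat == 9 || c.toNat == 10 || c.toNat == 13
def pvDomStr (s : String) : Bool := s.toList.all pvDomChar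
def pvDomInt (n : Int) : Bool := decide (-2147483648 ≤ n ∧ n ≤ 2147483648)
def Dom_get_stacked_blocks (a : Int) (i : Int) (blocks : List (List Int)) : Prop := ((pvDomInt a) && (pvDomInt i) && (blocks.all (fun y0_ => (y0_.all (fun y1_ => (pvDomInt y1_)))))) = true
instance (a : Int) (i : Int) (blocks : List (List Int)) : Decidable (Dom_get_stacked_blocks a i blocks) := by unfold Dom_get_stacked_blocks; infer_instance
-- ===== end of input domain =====

-- B replaces A's pop-one-at-a-time loop by locating the rightmost occurrence of a and
-- returning that reversed suffix as one slice; equivalence is about the RETURN value only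
-- (the Python B performs the same in-place truncation of blocks[i] as A's pops).

-- ===== PORT A =====
-- while blocks[i][-1] != a: result.append(blocks[i].pop()); then one final pop+append
def popLoopA (a : Int) (lst result : List Int) : List Int :=
  match PySem.List.pyGet? lst (-1) with
  | none => result                    -- Python would raise IndexError here (excluded by Pre_)
  | some last =>
    if last != a then
      match h2 : PySem.List.pop? lst (-1) with
      | none => result
      | some (aux, rest) => popLoopA a rest (result ++ [aux])
    else
      match PySem.List.pop? lst (-1) with
      | none => result
      | some (aux, _) => result ++ [aux]
termination_by lst.length
decreasing_by
  have := PySem.List.length_of_pop?_eq_some _ h2; simp at this ⊢; omega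

def get_stacked_blocks (a : Int) (i : Int) (blocks : List (List Int)) : List Int :=
  match PySem.List.pyGet? blocks i with
  | none => []                        -- IndexError (excluded by Pre_)
  | some lst => popLoopA a lst []

-- ===== PORT B =====
def get_stacked_blocks_alt (a : Int) (i : Int) (blocks : List (List Int)) : List Int :=
  match PySem.List.pyGet? blocks i with
  | none => []                        -- IndexError (excluded by Pre_)
  | some lst =>
    match PySem.List.slice? lst none none (-1) with      -- rev = lst[::-1]
    | none => []
    | some rev =>
      match PySem.List.index? rev a with                 -- j = rev.index(a)
      | none => []                    -- ValueError (excluded by Pre_)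
      | some j => PySem.List.slice rev none (some ((j : Int) + 1))   -- rev[:j+1]

-- ===== PRECONDITION & SPEC =====
-- Pre_: blocks[i] exists and contains a; otherwise both programs raise.
def Pre_get_stacked_blocks (a : Int) (i : Int) (blocks : List (List Int)) : Prop :=
  ((PySem.List.pyGet? blocks i).any (fun lst => lst.contains a)) = true
instance (a : Int) (i : Int) (blocks : List (List Int)) : Decidable (Pre_get_stacked_blocks a i blocks) := by unfold Pre_get_stacked_blocks; infer_instance
def pvWitness_get_stacked_blocks : Int × Int × List (List Int) := (2, 0, [[1, 2, 3]])

def Spec_get_stacked_blocks (a : Int) (i : Int) (blocks : List (List Int)) (out : List Int) : Prop := out = get_stacked_blocks_alt a i blocks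
instance (a : Int) (i : Int) (blocks : List (List Int)) (out : List Int) : Decidable (Spec_get_stacked_blocks a i blocks out) := by unfold Spec_get_stacked_blocks; infer_instance

-- ===== CLAIM (what is proved, stated in full; the proofs are below) =====
def Claim_equal_get_stacked_blocks : Prop := ∀ (a : Int) (i : Int) (blocks : List (List Int)), Dom_get_stacked_blocks a i blocks → Pre_get_stacked_blocks a i blocks → Spec_get_stacked_blocks a i blocks (get_stacked_blocks a i blocks)

-- ===== LEMMAS AND PROOFS =====

-- A's pop loop on r.reverse collects the first k+1 elements of r, k = first index of a in r.
theorem popLoopA_reverse (a : Int) (r : List Int) (k : Nat)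
    (hk : PySem.List.index? r a = some k) (acc : List Int) :
    popLoopA a r.reverse acc = acc ++ r.take (k + 1) := by
  induction r generalizing k acc with
  | nil => simp [PySem.List.index?_eq_idxOf?] at hk
  | cons x t ih =>
    rw [List.reverse_cons, popLoopA.eq_def]
    rw [PySem.List.pyGet?_neg_one_append_singleton]
    by_cases hx : x = a
    · subst hx
      rw [PySem.List.index?_cons_self] at hk
      cases hk
      simp [PySem.List.pop?_last]
    · rw [PySem.List.index?_cons_of_ne t hx] at hk
      obtain ⟨k', hk', rfl⟩ : ∃ k', PySem.List.index? t a = some k' ∧ k = k' + 1 := by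
        cases h' : PySem.List.index? t a with
        | none => rw [h'] at hk; simp at hk
        | some m => rw [h'] at hk; simp at hk; exact ⟨m, rfl, hk.symm⟩
      have hne : (x != a) = true := by simp [hx]
      simp only [hne, if_true]
      split
      · next hnone => rw [PySem.List.pop?_last] at hnone; cases hnone
      · next aux rest hsome =>
        rw [PySem.List.pop?_last] at hsome
        cases hsome
        rw [ih k' hk' (acc ++ [x])]
        simp [List.take_succ_cons]

theorem get_stacked_blocks_spec : Claim_equal_get_stacked_blocks := by
  intro a i blocks _ hpre
  unfold Spec_get_stacked_blocks get_stacked_blocks get_stacked_blocks_alt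
  unfold Pre_get_stacked_blocks at hpre
  cases hget : PySem.List.pyGet? blocks i with
  | none => simp [hget] at hpre
  | some lst =>
    rw [hget] at hpre
    dsimp only
    simp only [Option.any_some, List.contains_eq_mem, decide_eq_true_eq] at hpre
    have hmemrev : a ∈ lst.reverse := by simpa using hpre
    rw [PySem.List.slice?_none_none_neg_one]
    obtain ⟨k, hk⟩ : ∃ k, PySem.List.index? lst.reverse a = some k := by
      have := (PySem.List.index?_isSome_iff (xs := lst.reverse) (v := a)).mpr hmemrev
      exact Option.isSome_iff_exists.mp this
    dsimp only
    rw [hk]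
    dsimp only
    have hmain := popLoopA_reverse a lst.reverse k hk []
    rw [List.reverse_reverse] at hmain
    rw [hmain]
    have hcast : ((k : Int) + 1) = ((k + 1 : Nat) : Int) := by push_cast; ring
    rw [hcast, PySem.List.slice_to_natCast]
    simp

-- ===== VERDICT (by name: the statement is the Claim_ definition above) =====
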